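-- pv_equiv track=rewrite | github.com/kim-taewoo/TIL_PUBLIC | Algorithm/programmers/2019kakaoBlind/무지의먹방라이브_optimized.py | solution
-- ===== SOURCE A (Python) =====
-- def solution(food_times, k):
--     length = len(food_times)
--     sorted_food_times = sorted(food_times)
--
--     accu = 0
--     last_idx = 0
--     for i in range(length):
--         if i != 0:
--             remains = sorted_food_times[i] - sorted_food_times[i-1]
--         else:
--             remains = (sorted_food_times[i])
--         to_add = (length - i) * remains
--         accu += to_add
--         if accu > k:
--             last_idx = i - 1
--             break
--
--     # 바로 위 for 문이 break 되지 않고 끝까지 돌아버린 경우겠지? 그냥 else 문 써도 되려나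
--     if accu <= k:
--         return -1
--
--     lst = []
--     for j in range(length-1, -1, -1):
--         if food_times[j] - sorted_food_times[last_idx] > 0:
--             lst.append(j+1)
--     if len(lst):
--         # 초과분: accu-k-1. -1 까지 하는 이유는 0 이 되는 순간까지는 초과한 것이 아니기 때문.
--         # 나머지 연산: 초과하지 않고 잘 돌았던 마지막 인덱스 바퀴까지 살아남았던 food_times 의 개수가 몇바퀴 돌고 남은 나머지만큼 뒤에서 빼주어야 하니까
--         return lst[(accu-k-1) % len(lst)]
--     else:
--         return k % length + 1
-- ===== SOURCE B (Python) =====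
-- def eaten(food_times, v):
--     return sum(min(f, v) for f in food_times)
--
-- def solution(food_times, k):
--     total = sum(food_times)
--     if total <= k:
--         return -1
--     # binary search for the largest threshold v with eaten(food_times, v) <= k:
--     # every food with time <= v is finished, the rest have been eaten for v seconds
--     lo = min(0, min(food_times))
--     hi = max(food_times)
--     while lo + 1 < hi:
--         mid = (lo + hi) // 2
--         if eaten(food_times, mid) <= k:
--             lo = mid
--         else:
--             hi = mid
--     spent = eaten(food_times, lo)
--     survivors = [i + 1 for i, f in enumerate(food_times) if f > lo]
--     return survivors[(k - spent) % len(survivors)]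
-- ===== Notes on version B (the rewrite author's own statement) =====
-- stated objective: alternative
-- what changed: Replaces A's sort + layered accumulation scan + descending survivor list with a sort-free binary search over the threshold time v (largest v with sum(min(f,v)) <= k), then one pass collecting ascending survivors f > v indexed by (k - spent) mod count.
-- outside the precondition, e.g. on solution([-5, 3], -100): A returns 1, B returns 2; on solution([0], -1): A returns 1, B raises ZeroDivisionError
import Mathlib
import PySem

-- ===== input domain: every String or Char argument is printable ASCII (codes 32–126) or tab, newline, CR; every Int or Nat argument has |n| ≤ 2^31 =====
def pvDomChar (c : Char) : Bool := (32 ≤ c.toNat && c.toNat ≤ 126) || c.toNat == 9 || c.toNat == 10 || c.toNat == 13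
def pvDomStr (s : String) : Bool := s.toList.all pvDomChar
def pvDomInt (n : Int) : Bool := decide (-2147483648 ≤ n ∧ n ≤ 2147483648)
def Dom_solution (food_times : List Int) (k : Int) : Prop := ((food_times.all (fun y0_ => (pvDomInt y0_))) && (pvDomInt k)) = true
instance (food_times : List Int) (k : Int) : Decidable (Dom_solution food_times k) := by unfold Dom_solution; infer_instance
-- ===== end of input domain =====

-- B replaces A's sort + layered accumulation scan + descending survivor list by a sort-free
-- binary search for the largest threshold time v with eaten(food_times,v) ≤ k, then one
-- ascending survivor pass (objective: alternative).
-- ===== PORT A =====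
-- the 'for i in range(length)' loop with break, carrying (accu, last_idx, broke)
def solutionLoop (s : List Int) (n k : Int) (i accu : Int) : Int × Int × Bool :=
  if _h : i < n then
    let remains : Int :=
      if i ≠ 0 then PySem.List.pyGetD s i 0 - PySem.List.pyGetD s (i - 1) 0
      else PySem.List.pyGetD s i 0
    let accu' := accu + (n - i) * remains
    if accu' > k then (accu', i - 1, true)
    else solutionLoop s n k (i + 1) accu'
  else (accu, 0, false)
termination_by (n - i).toNat
decreasing_by omega

def solution (food_times : List Int) (k : Int) : Int :=
  let length : Int := food_times.length
  let s := PySem.List.sorted food_times (fun x => x) false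
  let r := solutionLoop s length k 0 0
  let accu := r.1
  let last_idx := r.2.1
  if accu ≤ k then -1
  else
    let lst := (PySem.List.pyRange (length - 1) (-1) (-1)).foldl
      (fun lst j =>
        if PySem.List.pyGetD food_times j 0 - PySem.List.pyGetD s last_idx 0 > 0
        then lst ++ [j + 1] else lst) ([] : List Int)
    if lst.length ≠ 0 then
      PySem.List.pyGetD lst (PySem.Int.mod (accu - k - 1) (lst.length : Int)) 0
    else PySem.Int.mod k length + 1

-- ===== PORT B =====
-- Source B's eaten(food_times, v) = sum(min(f, v) for f in food_times)
def pvEaten (food_times : List Int) (v : Int) : Int :=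
  (food_times.map (fun f => min f v)).sum

-- Source B's 'while lo + 1 < hi' binary-search loop (mid inlined)
def pvBSearch (food_times : List Int) (k lo hi : Int) : Int :=
  if _h : lo + 1 < hi then
    if pvEaten food_times (PySem.Int.floordiv (lo + hi) 2) ≤ k then
      pvBSearch food_times k (PySem.Int.floordiv (lo + hi) 2) hi
    else
      pvBSearch food_times k lo (PySem.Int.floordiv (lo + hi) 2)
  else lo
termination_by (hi - lo).toNat
decreasing_by
  all_goals
    have hb := PySem.Int.floordiv_two_mid_bounds (lo := lo + 1) (hi := hi - 1) (by omega)
    rw [show lo + 1 + (hi - 1) = lo + hi from by ring] at hb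
    omega

def solution_alt (food_times : List Int) (k : Int) : Int :=
  let total := food_times.sum
  if total ≤ k then -1
  else
    let lo := min 0 ((PySem.List.min? food_times (fun x => x)).getD 0)
    let hi := (PySem.List.max? food_times (fun x => x)).getD 0
    let r := pvBSearch food_times k lo hi
    let spent := pvEaten food_times r
    let survivors := (PySem.List.enumerate food_times 0).filterMap
      (fun p => if p.2 > r then some (p.1 + 1) else none)
    PySem.List.pyGetD survivors (PySem.Int.mod (k - spent) (survivors.length : Int)) 0

-- ===== PRECONDITION & SPEC =====
-- Pre_ excludes the corner where A's behaviour is accidental or a crash: negative k on the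
-- empty list (A raises ZeroDivisionError), and negative k below length*min with a
-- non-positive minimum, where A's 'sorted_food_times[-1]' negative-index wraparound makes
-- the survivor list empty by accident and A returns k % length + 1, while B's positive-time
-- survivor list differs there or is empty (B raises ZeroDivisionError).
def Pre_solution (food_times : List Int) (k : Int) : Prop :=
  0 ≤ k ∨ (food_times ≠ [] ∧
    ((food_times.length : Int) * (food_times.min?.getD 0) ≤ k ∨ 0 < food_times.min?.getD 0))
instance (food_times : List Int) (k : Int) : Decidable (Pre_solution food_times k) := by
  unfold Pre_solution; infer_instance
def pvWitness_solution : List Int × Int := ([3, 1, 2], 5)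

def Spec_solution (food_times : List Int) (k : Int) (out : Int) : Prop := out = solution_alt food_times k
instance (food_times : List Int) (k : Int) (out : Int) : Decidable (Spec_solution food_times k out) := by unfold Spec_solution; infer_instance

-- ===== CLAIM (what is proved, stated in full; the proofs are below) =====
def Claim_equal_solution : Prop := ∀ (food_times : List Int) (k : Int), Dom_solution food_times k → Pre_solution food_times k → Spec_solution food_times k (solution food_times k)

-- ===== LEMMAS AND PROOFS =====

-- proof-side twin of A's sorted-scan loop that also returns the unconsumed suffix
def pvRun (k : Int) : List Int → Int → Int → Int → (Int × Int × Int) × List Int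
  | [], spent, live, prev => ((spent, live, prev), [])
  | t :: rest, spent, live, prev =>
    if spent + (t - prev) * live > k then ((spent, live, prev), t :: rest)
    else pvRun k rest (spent + (t - prev) * live) (live - 1) t

-- structure of pvRun's result: consumed prefix, prev = its last, live decremented
theorem pvRun_structure (k : Int) (l : List Int) (sp lv pv : Int) :
    ∃ con, l = con ++ (pvRun k l sp lv pv).2 ∧
      (pvRun k l sp lv pv).1.2.2 = con.getLastD pv ∧
      (pvRun k l sp lv pv).1.2.1 = lv - con.length := by
  induction l generalizing sp lv pv with
  | nil => exact ⟨[], by simp [pvRun]⟩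
  | cons t rest ih =>
    simp only [pvRun]
    split
    · exact ⟨[], by simp⟩
    · obtain ⟨con, h1, h2, h3⟩ := ih (sp + (t - pv) * lv) (lv - 1) t
      refine ⟨t :: con, by simpa using h1, ?_, ?_⟩
      · rw [List.getLastD_cons]; exact h2
      · rw [h3]; simp; omega

theorem pvRun_spent_le (k : Int) (l : List Int) (sp lv pv : Int) (h : sp ≤ k) :
    (pvRun k l sp lv pv).1.1 ≤ k := by
  induction l generalizing sp lv pv with
  | nil => simpa [pvRun]
  | cons t rest ih =>
    simp only [pvRun]
    split
    · simpa
    · exact ih _ _ _ (by omega)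

-- once the loop has popped at least one element its spent stays ≤ k
theorem pvRun_le_of_moved (k : Int) (l : List Int) (sp lv pv : Int) (hne : l ≠ [])
    (h : (pvRun k l sp lv pv).2 ≠ l) : (pvRun k l sp lv pv).1.1 ≤ k := by
  cases l with
  | nil => exact absurd rfl hne
  | cons u rest =>
    by_cases hbr : sp + (u - pv) * lv > k
    · exact absurd (by simp [pvRun, if_pos hbr]) h
    · simp only [pvRun, if_neg hbr]
      exact pvRun_spent_le k rest _ _ _ (by omega)

theorem pvRun_break (k : Int) (l : List Int) (sp lv pv t : Int) (rest : List Int)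
    (h : (pvRun k l sp lv pv).2 = t :: rest) :
    (pvRun k l sp lv pv).1.1 + (t - (pvRun k l sp lv pv).1.2.2) * (pvRun k l sp lv pv).1.2.1 > k := by
  induction l generalizing sp lv pv with
  | nil => simp [pvRun] at h
  | cons u rest' ih =>
    by_cases hbr : sp + (u - pv) * lv > k
    · simp only [pvRun, if_pos hbr] at h ⊢
      simp only [List.cons.injEq] at h
      obtain ⟨h1, -⟩ := h
      subst h1
      simpa using hbr
    · simp only [pvRun, if_neg hbr] at h ⊢
      exact ih _ _ _ h

-- the quantity spent + sum(remaining) - len(remaining)*prev is a loop invariant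
theorem pvRun_phi (k : Int) (l : List Int) (sp lv pv : Int) (hlv : lv = (l.length : Int)) :
    (pvRun k l sp lv pv).1.1 + (pvRun k l sp lv pv).2.sum
      - ((pvRun k l sp lv pv).2.length : Int) * (pvRun k l sp lv pv).1.2.2
    = sp + l.sum - (l.length : Int) * pv := by
  induction l generalizing sp lv pv with
  | nil => simp [pvRun]
  | cons t rest ih =>
    simp only [pvRun]
    split
    · simp
    · rw [ih (sp + (t - pv) * lv) (lv - 1) t (by simp at hlv ⊢; omega)]
      simp at hlv ⊢
      subst hlv; ring

-- if the loop breaks, the total sum exceeds k  (sorted list: later increments are nonnegative)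
theorem pvRun_break_sum (k : Int) (l : List Int) (sp lv pv : Int)
    (hs : l.Pairwise (· ≤ ·)) (hlv : lv = (l.length : Int))
    (h : (pvRun k l sp lv pv).2 ≠ []) :
    sp + l.sum - (l.length : Int) * pv > k := by
  induction l generalizing sp lv pv with
  | nil => simp [pvRun] at h
  | cons t rest ih =>
    by_cases hbr : sp + (t - pv) * lv > k
    · have hall : ∀ x ∈ rest, t ≤ x := fun x hx => (List.pairwise_cons.mp hs).1 x hx
      have h2 : rest.sum ≥ (rest.length : Int) * t := by
        clear hbr hlv ih hs h
        induction rest with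
        | nil => simp
        | cons u us ihu =>
          have h4 := hall u (by simp)
          have h3 : us.sum ≥ (us.length : Int) * t :=
            ihu (fun x hx => hall x (by simp [hx]))
          simp; nlinarith [h3]
      simp only [List.sum_cons, List.length_cons] at *
      push_cast at hlv ⊢
      rw [hlv] at hbr
      ring_nf at hbr h2 ⊢
      linarith [hbr, h2]
    · simp only [pvRun, if_neg hbr] at h
      have := ih (sp + (t - pv) * lv) (lv - 1) t (List.pairwise_cons.mp hs).2
        (by simp at hlv ⊢; omega) h
      simp only [List.sum_cons, List.length_cons] at hlv ⊢
      push_cast at this hlv ⊢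
      rw [hlv] at this
      ring_nf at this ⊢
      linarith [this]

-- core correspondence: A's index loop tracks pvRun over the sorted list
theorem loop_corr (s : List Int) (k : Int) :
    ∀ (suf pre : List Int) (acc : Int), s = pre ++ suf →
    solutionLoop s (s.length : Int) k (pre.length : Int) acc =
      (match pvRun k suf acc ((s.length : Int) - (pre.length : Int)) (pre.getLastD 0) with
       | ((sp, lv, pv), []) => (sp, 0, false)
       | ((sp, lv, pv), t :: _) => (sp + (t - pv) * lv, ((s.length : Int) - lv) - 1, true)) := by
  intro suf
  induction suf with
  | nil =>
    intro pre acc h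
    subst h
    rw [solutionLoop]
    simp [pvRun]
  | cons t rest ih =>
    intro pre acc h
    have hi : ((pre.length : Int)) < ((s.length : Int)) := by
      subst h; simp
    have hget : PySem.List.pyGetD s (pre.length : Int) 0 = t := by
      rw [PySem.List.pyGetD_natCast]
      subst h
      simp [List.getD]
    have hrem : (if (pre.length : Int) ≠ 0 then
          PySem.List.pyGetD s (pre.length : Int) 0 - PySem.List.pyGetD s ((pre.length : Int) - 1) 0
        else PySem.List.pyGetD s (pre.length : Int) 0) = t - pre.getLastD 0 := by
      rcases List.eq_nil_or_concat pre with hp | ⟨pre', p, hp⟩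
      · subst hp; simpa using hget
      · rw [List.concat_eq_append] at hp
        subst hp
        have hne : (((pre' ++ [p]).length : Int)) ≠ 0 := by
          simp only [List.length_append, List.length_cons, List.length_nil]
          push_cast; omega
        rw [if_pos hne, hget]
        have h1 : (((pre' ++ [p]).length : Int)) - 1 = (pre'.length : Int) := by
          simp only [List.length_append, List.length_cons, List.length_nil]
          push_cast; ring
        rw [h1, PySem.List.pyGetD_natCast]
        subst h
        rw [List.append_assoc]
        simp [List.getD]
    rw [solutionLoop, dif_pos hi]
    simp only [hrem]
    by_cases hbr : acc + (t - pre.getLastD 0) * ((s.length : Int) - (pre.length : Int)) > k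
    · rw [if_pos (by linarith [hbr] : acc + ((s.length : Int) - (pre.length : Int)) * (t - pre.getLastD 0) > k)]
      simp only [pvRun, if_pos hbr]
      refine Prod.ext (by ring) (Prod.ext (by simp) rfl)
    · rw [if_neg (by intro hc; exact hbr (by linarith [hc]))]
      simp only [pvRun, if_neg hbr]
      have := ih (pre ++ [t]) (acc + (t - pre.getLastD 0) * ((s.length : Int) - (pre.length : Int)))
        (by rw [h]; simp)
      simp only [List.length_append, List.length_cons, List.length_nil, List.getLastD_concat] at this
      push_cast at this
      rw [show (s.length : Int) - ((pre.length : Int) + 1) = (s.length : Int) - (pre.length : Int) - 1 from by ring] at this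
      rw [show acc + ((s.length : Int) - (pre.length : Int)) * (t - pre.getLastD 0)
            = acc + (t - pre.getLastD 0) * ((s.length : Int) - (pre.length : Int)) from by ring]
      exact this

theorem pv_foldl_append_if {α β : Type} (p : α → Prop) [DecidablePred p] (f : α → β)
    (l : List α) (acc : List β) :
    l.foldl (fun acc x => if p x then acc ++ [f x] else acc) acc
      = acc ++ (l.filter (fun x => decide (p x))).map f := by
  induction l generalizing acc with
  | nil => simp
  | cons x xs ih =>
    by_cases hx : p x
    · simp [hx, ih]
    · simp [hx, ih]

theorem pv_filterMap_if {α β : Type} (p : α → Prop) [DecidablePred p] (f : α → β) (l : List α) :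
    l.filterMap (fun x => if p x then some (f x) else none)
      = (l.filter (fun x => decide (p x))).map f := by
  induction l with
  | nil => simp
  | cons x xs ih =>
    by_cases hx : p x
    · simp [hx, ih]
    · simp [hx, ih]

-- descending-j foldl over food_times is the reverse of the ascending filterMap
theorem lst_eq_reverse (food_times : List Int) (c : Int) :
    (PySem.List.pyRange ((food_times.length : Int) - 1) (-1) (-1)).foldl
      (fun lst j => if PySem.List.pyGetD food_times j 0 - c > 0 then lst ++ [j + 1] else lst)
      ([] : List Int)
    = ((PySem.List.enumerate food_times 0).filterMap
        (fun p => if p.2 > c then some (p.1 + 1) else none)).reverse := by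
  rw [PySem.List.pyRange_neg_one_eq_reverse]
  rw [show (-1 : Int) + 1 = 0 from by ring, show (food_times.length : Int) - 1 + 1 = (food_times.length : Int) from by ring]
  rw [pv_foldl_append_if (fun j => PySem.List.pyGetD food_times j 0 - c > 0) (fun j => j + 1)]
  rw [List.filter_reverse, List.map_reverse]
  rw [PySem.List.enumerate_eq_map_pyRange food_times 0, List.filterMap_map]
  simp only [Function.comp_def]
  rw [pv_filterMap_if (fun j => PySem.List.pyGetD food_times j 0 > c) (fun j => j + 1)]
  simp only [List.nil_append, PySem.List.len_eq]
  congr 2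
  apply List.filter_congr
  intro j _
  simp

-- in a ≤-sorted nonempty list every element is at most the last one
theorem pv_mem_le_getLastD (l : List Int) (hp : l.Pairwise (· ≤ ·)) :
    ∀ (d : Int), ∀ x ∈ l, x ≤ l.getLastD d := by
  induction l with
  | nil => simp
  | cons a l' ih =>
    intro d x hx
    rcases List.eq_nil_or_concat l' with h | ⟨m, b, h⟩
    · subst h; simp at hx; simp [hx]
    · rw [List.concat_eq_append] at h
      have hne : l' ≠ [] := by subst h; simp
      rw [List.getLastD_cons]
      rcases List.mem_cons.mp hx with rfl | hx'
      · have hlast : l'.getLastD x ∈ l' := by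
          rw [List.getLastD_eq_getLast?, List.getLast?_eq_some_getLast hne]
          exact List.getLast_mem hne
        exact (List.pairwise_cons.mp hp).1 _ hlast
      · exact ih (List.pairwise_cons.mp hp).2 a x hx'

-- ===== B-side lemmas: pvEaten and the binary search =====

theorem pvEaten_mono (l : List Int) (v w : Int) (h : v ≤ w) : pvEaten l v ≤ pvEaten l w := by
  unfold pvEaten
  induction l with
  | nil => simp
  | cons a t ih =>
    simp only [List.map_cons, List.sum_cons]
    have : min a v ≤ min a w := by omega
    omega

theorem pvEaten_all_le (l : List Int) (v : Int) (h : ∀ x ∈ l, x ≤ v) : pvEaten l v = l.sum := by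
  unfold pvEaten
  induction l with
  | nil => simp
  | cons a t ih =>
    simp only [List.map_cons, List.sum_cons]
    have ha := h a (by simp)
    rw [ih (fun x hx => h x (by simp [hx]))]
    omega

theorem pvEaten_all_ge (l : List Int) (v : Int) (h : ∀ x ∈ l, v ≤ x) :
    pvEaten l v = (l.length : Int) * v := by
  unfold pvEaten
  induction l with
  | nil => simp
  | cons a t ih =>
    simp only [List.map_cons, List.sum_cons, List.length_cons]
    have ha := h a (by simp)
    rw [ih (fun x hx => h x (by simp [hx]))]
    push_cast
    have : min a v = v := by omega
    rw [this]; ring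

theorem pvEaten_append (a b : List Int) (v : Int) :
    pvEaten (a ++ b) v = pvEaten a v + pvEaten b v := by
  unfold pvEaten; simp

theorem pvEaten_perm (a b : List Int) (v : Int) (h : a.Perm b) : pvEaten a v = pvEaten b v := by
  unfold pvEaten
  exact (h.map _).sum_eq

-- postcondition of the binary-search loop
theorem pvBSearch_spec (l : List Int) (k : Int) :
    ∀ (n : Nat) (lo hi : Int), (hi - lo).toNat = n → lo < hi → k < pvEaten l hi →
    lo ≤ pvBSearch l k lo hi ∧ pvBSearch l k lo hi < hi ∧
    k < pvEaten l (pvBSearch l k lo hi + 1) ∧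
    (pvEaten l lo ≤ k → pvEaten l (pvBSearch l k lo hi) ≤ k) ∧
    (k < pvEaten l lo → pvBSearch l k lo hi = lo) := by
  intro n
  induction n using Nat.strong_induction_on with
  | _ n ih =>
    intro lo hi hn hlt hhi
    rw [pvBSearch]
    by_cases h : lo + 1 < hi
    · have hb := PySem.Int.floordiv_two_mid_bounds (lo := lo + 1) (hi := hi - 1) (by omega)
      rw [show lo + 1 + (hi - 1) = lo + hi from by ring] at hb
      rw [dif_pos h]
      by_cases hm : pvEaten l (PySem.Int.floordiv (lo + hi) 2) ≤ k
      · rw [if_pos hm]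
        obtain ⟨h1, h2, h3, h4, -⟩ :=
          ih ((hi - PySem.Int.floordiv (lo + hi) 2).toNat) (by omega) _ hi rfl (by omega) hhi
        exact ⟨by omega, h2, h3, fun _ => h4 hm, fun hk =>
          absurd (le_trans (pvEaten_mono l lo _ (by omega)) hm) (not_le.mpr hk)⟩
      · rw [if_neg hm]
        obtain ⟨h1, h2, h3, h4, h5⟩ :=
          ih ((PySem.Int.floordiv (lo + hi) 2 - lo).toNat) (by omega) lo _ rfl (by omega)
            (not_le.mp hm)
        exact ⟨h1, by omega, h3, h4, h5⟩
    · rw [dif_neg h]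
      have : hi = lo + 1 := by omega
      subst this
      exact ⟨le_refl lo, by omega, hhi, fun h => h, fun _ => rfl⟩

-- ===== VERDICT (by name: the statement is the Claim_ definition above) =====
theorem solution_spec : Claim_equal_solution := by
  unfold Claim_equal_solution Spec_solution Pre_solution
  intro food_times k _hdom hpre
  unfold solution solution_alt
  simp only []
  set n : Int := (food_times.length : Int) with hn
  set s := PySem.List.sorted food_times (fun x => x) false with hs
  have hperm : s.Perm food_times := PySem.List.sorted_perm food_times (fun x => x) false
  have hpair : s.Pairwise (· ≤ ·) := PySem.List.sorted_pairwise food_times (fun x => x)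
  have hlen : (s.length : Int) = n := by rw [hs, PySem.List.length_sorted, hn]
  have hsum : s.sum = food_times.sum := hperm.sum_eq
  have hcorr := loop_corr s k s [] 0 (by simp)
  simp only [List.length_nil, Nat.cast_zero, List.getLastD_nil, sub_zero] at hcorr
  rw [hlen] at hcorr
  rcases hR : pvRun k s 0 n 0 with ⟨⟨sp, lv, pv⟩, rem⟩
  rw [hR] at hcorr
  have hphi := pvRun_phi k s 0 n 0 hlen.symm
  rw [hR] at hphi
  cases rem with
  | nil =>
    -- the loop consumed everything: sum(food_times) <= k, both sides return -1
    simp only [List.sum_nil, List.length_nil, Nat.cast_zero, add_zero, zero_mul, sub_zero,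
      zero_add] at hphi
    have hsple : sp ≤ k := by
      by_cases hsnil : s = []
      · rw [hsnil] at hperm hR
        have hf : food_times = [] := hperm.symm.eq_nil
        have hk0 : 0 ≤ k := by
          rcases hpre with h | ⟨hne, -⟩
          · exact h
          · exact absurd hf hne
        simp [pvRun, Prod.ext_iff] at hR
        omega
      · have hne2 : (pvRun k s 0 n 0).2 ≠ s := by
          rw [hR]; intro hcontra; exact hsnil hcontra.symm
        have := pvRun_le_of_moved k s 0 n 0 hsnil hne2
        rw [hR] at this; exact this
    have hcorr' : solutionLoop s n k 0 0 = (sp, 0, false) := hcorr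
    rw [hcorr']
    simp only []
    have hsps : sp = s.sum := by simpa using hphi
    rw [if_pos hsple, if_pos (by rw [← hsum, ← hsps]; exact hsple)]
  | cons t rest =>
    -- the loop broke at t: sum(food_times) > k
    have hsumgt : food_times.sum > k := by
      have := pvRun_break_sum k s 0 n 0 hpair hlen.symm (by rw [hR]; simp)
      simp only [zero_add, mul_zero, sub_zero] at this
      rwa [hsum] at this
    have hbrk : sp + (t - pv) * lv > k := by
      have := pvRun_break k s 0 n 0 t rest (by rw [hR])
      rw [hR] at this; exact this
    obtain ⟨con, hcon, hpv, hlv⟩ := pvRun_structure k s 0 n 0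
    rw [hR] at hcon hpv hlv
    simp only [] at hcon hpv hlv
    have hlv' : lv = ((rest.length : Int) + 1) := by
      have : s.length = con.length + (rest.length + 1) := by rw [hcon]; simp
      rw [hlv]
      rw [← hlen] at *
      push_cast [this]
      ring
    have hlvpos : 0 < lv := by rw [hlv']; positivity
    have hcorr' : solutionLoop s n k 0 0 = (sp + (t - pv) * lv, n - lv - 1, true) := hcorr
    rw [hcorr']
    simp only []
    rw [if_neg (not_le.mpr hbrk), if_neg (not_le.mpr hsumgt)]
    -- food_times is nonempty here; name its min and max
    have hne_ft : food_times ≠ [] := by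
      intro hft
      rw [hft] at hperm
      rw [hperm.eq_nil] at hcon
      simp at hcon
    obtain ⟨mv, hmv⟩ : ∃ mv, PySem.List.min? food_times (fun x => x) = some mv := by
      rcases h : PySem.List.min? food_times (fun x => x) with _ | mv
      · exact absurd ((PySem.List.min?_eq_none_iff _ _).mp h) hne_ft
      · exact ⟨mv, rfl⟩
    obtain ⟨Mv, hMv⟩ : ∃ Mv, PySem.List.max? food_times (fun x => x) = some Mv := by
      rcases h : PySem.List.max? food_times (fun x => x) with _ | Mv
      · exact absurd ((PySem.List.max?_eq_none_iff _ _).mp h) hne_ft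
      · exact ⟨Mv, rfl⟩
    have hmv_min : ∀ y ∈ food_times, mv ≤ y := PySem.List.min?_isMin hmv
    have hmv_mem : mv ∈ food_times := PySem.List.min?_mem hmv
    have hMv_max : ∀ y ∈ food_times, y ≤ Mv := PySem.List.max?_isMax hMv
    have hCM : pvEaten food_times Mv = food_times.sum := pvEaten_all_le _ _ hMv_max
    simp only [hmv, hMv, Option.getD_some]
    -- relate mv to the Mathlib min? used by Pre_
    have hmv2 : food_times.min? = some mv := by
      rcases h2 : food_times.min? with _ | m2
      · exact absurd (List.min?_eq_none_iff.mp h2) hne_ft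
      · obtain ⟨hm2mem, hm2min⟩ := List.min?_eq_some_iff.mp h2
        exact congrArg some (le_antisymm (hm2min mv hmv_mem) (hmv_min m2 hm2mem))
    -- elements of food_times are ≤ pv or ≥ t, and the suffix facts
    have hpair_rest : (t :: rest).Pairwise (· ≤ ·) :=
      (hcon ▸ hpair).sublist (List.sublist_append_right _ _)
    have hsuf_ge : ∀ x ∈ t :: rest, t ≤ x := by
      intro x hx
      rcases List.mem_cons.mp hx with rfl | hx'
      · exact le_refl x
      · exact (List.pairwise_cons.mp hpair_rest).1 x hx'
    rcases List.eq_nil_or_concat con with hc | ⟨con', p, hc⟩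
    · -- the loop broke on the very first element: t = min > 0, everything survives
      subst hc
      simp only [List.nil_append] at hcon
      simp only [List.getLastD_nil] at hpv
      simp only [List.length_nil, Nat.cast_zero, sub_zero] at hlv
      have hne : s ≠ [] := by rw [hcon]; simp
      have hsp0 : sp = 0 := by
        rw [hcon] at hphi
        simp only [hpv, mul_zero, sub_zero, zero_add] at hphi
        simpa using hphi
      have hidx : n - lv - 1 = (-1 : Int) := by omega
      rw [hidx, PySem.List.pyGetD_neg_one s 0 hne]
      rw [show n - 1 = ((food_times.length : Int)) - 1 from by rw [hn]]
      rw [lst_eq_reverse food_times (s.getLast hne)]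
      have hgld : s.getLastD 0 = s.getLast hne := by
        rw [List.getLastD_eq_getLast?, List.getLast?_eq_some_getLast hne]
        rfl
      have hhead : ∀ y ∈ food_times, t ≤ y := by
        have hsf : PySem.List.sorted food_times (fun x => x) = t :: rest := by
          rw [← hs]; exact hcon
        exact PySem.List.key_head_sorted_le food_times (fun x => x) hsf
      have hnil : (PySem.List.enumerate food_times 0).filterMap
          (fun x => if x.2 > s.getLast hne then some (x.1 + 1) else none) = [] := by
        rw [List.filterMap_eq_nil_iff]
        intro a ha
        have hmem : a.2 ∈ food_times := by
          have := PySem.List.map_snd_enumerate food_times 0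
          rw [← this]
          exact List.mem_map_of_mem ha
        have hle : a.2 ≤ s.getLast hne := by
          rw [← hgld]
          exact pv_mem_le_getLastD s hpair 0 a.2 (hperm.mem_iff.mpr hmem)
        simp [not_lt.mpr hle]
      rw [hnil]
      simp only [List.reverse_nil, List.length_nil, ne_eq, not_true_eq_false, if_false]
      -- A returns k % n + 1.  Now the B side: mv = t > 0
      have hmem_t : t ∈ food_times := hperm.mem_iff.mp (by rw [hcon]; simp)
      have hmvt : mv = t := le_antisymm (hmv_min t hmem_t) (hhead mv hmv_mem)
      have hb : t * lv > k := by
        rw [hsp0, hpv] at hbrk; simpa using hbrk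
      have htpos : 0 < t := by
        rcases hpre with h | ⟨-, hmk | hmk⟩
        · nlinarith [hb, hlvpos, h]
        · exfalso
          rw [hmv2] at hmk
          simp only [Option.getD_some] at hmk
          rw [hmvt, mul_comm] at hmk
          rw [hlv] at hb
          linarith
        · rw [hmv2] at hmk
          simp only [Option.getD_some] at hmk
          omega
      have hlo0 : min 0 mv = 0 := by omega
      simp only [hlo0]
      -- binary search facts
      have hge0 : ∀ x ∈ food_times, (0:Int) ≤ x := fun x hx => le_trans (by omega) (hhead x hx)
      have hC0 : pvEaten food_times 0 = 0 := by
        rw [pvEaten_all_ge _ _ hge0]; ring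
      have hCt : pvEaten food_times t = n * t := by
        rw [pvEaten_all_ge _ _ hhead, hn]
      have hCtgt : k < pvEaten food_times t := by
        rw [hCt, hlv] at *
        nlinarith [hb]
      have hMvpos : 0 < Mv := lt_of_lt_of_le htpos (hMv_max t hmem_t)
      obtain ⟨hr1, hr2, hr3, hr4, hr5⟩ :=
        pvBSearch_spec food_times k (Mv - 0).toNat 0 Mv rfl hMvpos (by rw [hCM]; exact hsumgt)
      set r := pvBSearch food_times k 0 Mv with hrdef
      have hrt : r < t := by
        by_cases hk0 : pvEaten food_times 0 ≤ k
        · by_contra hge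
          exact absurd (le_trans (pvEaten_mono food_times t r (by omega)) (hr4 hk0))
            (not_le.mpr hCtgt)
        · rw [hr5 (not_le.mp hk0)]; exact htpos
      have hCr : pvEaten food_times r = n * r := by
        rw [pvEaten_all_ge _ _ (fun x hx => le_trans (by omega) (hhead x hx)), hn]
      rw [hCr]
      -- B's survivors: all foods
      rw [pv_filterMap_if (fun x : Int × Int => x.2 > r) (fun x : Int × Int => x.1 + 1)]
      rw [List.filter_eq_self.mpr (by
        intro a ha
        have hmem : a.2 ∈ food_times := by
          have := PySem.List.map_snd_enumerate food_times 0
          rw [← this]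
          exact List.mem_map_of_mem ha
        simp only [decide_eq_true_eq]
        have := hhead a.2 hmem
        omega)]
      have hnpos : 0 < n := by omega
      have hnpos' : 0 < (food_times.length : Int) := hn ▸ hnpos
      rw [List.length_map, PySem.List.length_enumerate]
      rw [PySem.Int.mod_eq_emod_of_pos hnpos', PySem.Int.mod_eq_emod_of_pos hnpos']
      have hmodeq : (k - (food_times.length : Int) * r) % (food_times.length : Int)
          = k % (food_times.length : Int) := by
        rw [show k - (food_times.length : Int) * r = k + (food_times.length : Int) * (-r) from by ring,
          Int.add_mul_emod_self_left]
      rw [show n * r = (food_times.length : Int) * r from by rw [hn], hmodeq]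
      have hm0 : 0 ≤ k % (food_times.length : Int) := Int.emod_nonneg k (by omega)
      have hm1 : k % (food_times.length : Int) < (food_times.length : Int) :=
        Int.emod_lt_of_pos k hnpos'
      rw [PySem.List.pyGetD_eq_getElem _ 0 hm0 (by
        rw [List.length_map, PySem.List.length_enumerate]; exact hm1)]
      rw [List.getElem_map, PySem.List.getElem_enumerate]
      simp only [zero_add]
      rw [Int.toNat_of_nonneg hm0]
    · -- the loop consumed con = con' ++ [p]: threshold is p = pv
      rw [List.concat_eq_append] at hc
      subst hc
      rw [List.getLastD_concat] at hpv
      have hsple : sp ≤ k := by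
        have hnes : s ≠ [] := by rw [hcon]; simp
        have hne2 : (pvRun k s 0 n 0).2 ≠ s := by
          rw [hR, hcon]
          intro hcontra
          have hlc := congrArg List.length hcontra
          simp at hlc
          omega
        have := pvRun_le_of_moved k s 0 n 0 hnes hne2
        rw [hR] at this; exact this
      have htgt : pv < t := by nlinarith [hbrk, hsple, hlvpos]
      have hidx : n - lv - 1 = ((con'.length : Nat) : Int) := by
        rw [hlv]
        simp only [List.length_append, List.length_cons, List.length_nil]
        push_cast
        ring
      have hthr : PySem.List.pyGetD s (n - lv - 1) 0 = pv := by
        rw [hidx, PySem.List.pyGetD_natCast, hpv]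
        rw [hcon, List.append_assoc]
        simp [List.getD]
      rw [hthr]
      rw [show n - 1 = ((food_times.length : Int)) - 1 from by rw [hn]]
      rw [lst_eq_reverse food_times pv]
      set F := (PySem.List.enumerate food_times 0).filterMap
        (fun x => if x.2 > pv then some (x.1 + 1) else none) with hF
      have hpair_con : (con' ++ [p]).Pairwise (· ≤ ·) :=
        (hcon ▸ hpair).sublist (List.sublist_append_left _ _)
      have hcon_le : ∀ x ∈ con' ++ [p], x ≤ pv := by
        intro x hx
        have := pv_mem_le_getLastD (con' ++ [p]) hpair_con 0 x hx
        rwa [List.getLastD_concat, ← hpv] at this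
      -- every food is ≤ pv or ≥ t
      have hdichot : ∀ x ∈ food_times, x ≤ pv ∨ t ≤ x := by
        intro x hx
        have hxs : x ∈ s := hperm.mem_iff.mpr hx
        rw [hcon] at hxs
        rcases List.mem_append.mp hxs with h1 | h1
        · exact Or.inl (hcon_le x h1)
        · exact Or.inr (hsuf_ge x h1)
      -- the eaten function between pv and t
      have hsplitC : ∀ v, pv ≤ v → v ≤ t →
          pvEaten food_times v = (con' ++ [p]).sum + lv * v := by
        intro v h1 h2
        rw [pvEaten_perm food_times s v hperm.symm, hcon, pvEaten_append]
        rw [pvEaten_all_le _ _ (fun x hx => le_trans (hcon_le x hx) h1)]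
        rw [pvEaten_all_ge _ _ (fun x hx => le_trans h2 (hsuf_ge x hx))]
        rw [hlv']
        simp only [List.length_cons]
        push_cast
        ring
      have hssum : s.sum = (con' ++ [p]).sum + (t :: rest).sum := by
        rw [hcon]; simp; ring
      have hsp_eq : sp = (con' ++ [p]).sum + lv * pv := by
        have h0 : sp + (t :: rest).sum - ((t :: rest).length : Int) * pv
            = 0 + s.sum - n * 0 := hphi
        rw [hssum] at h0
        have hl : ((t :: rest).length : Int) = lv := by
          rw [hlv']; simp
        rw [hl] at h0
        linarith [h0]
      have hCpv : pvEaten food_times pv = sp := by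
        rw [hsplitC pv (le_refl pv) (le_of_lt htgt), hsp_eq]
      have hCt : pvEaten food_times t = sp + (t - pv) * lv := by
        rw [hsplitC t (le_of_lt htgt) (le_refl t), hsp_eq]; ring
      -- the binary search bounds
      have hClo : pvEaten food_times (min 0 mv) ≤ k := by
        by_cases hmv0 : mv ≤ 0
        · rw [min_eq_right hmv0, pvEaten_all_ge _ _ hmv_min]
          rcases hpre with h | ⟨-, hmk | hmk⟩
          · have hL0 : (0:Int) ≤ (food_times.length : Int) := by positivity
            nlinarith [hL0, hmv0, h]
          · rw [hmv2] at hmk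
            simpa using hmk
          · rw [hmv2] at hmk
            simp only [Option.getD_some] at hmk
            omega
        · rw [min_eq_left (by omega)]
          have hge0 : ∀ x ∈ food_times, (0:Int) ≤ x :=
            fun x hx => le_trans (by omega) (hmv_min x hx)
          have hC0 : pvEaten food_times 0 = 0 := by
            rw [pvEaten_all_ge _ _ hge0]; ring
          rw [hC0]
          have hpv0 : 0 ≤ pv := le_trans (by omega) (hmv_min pv (hperm.mem_iff.mp
            (by rw [hcon]; simp; exact Or.inr (Or.inl hpv))))
          have := pvEaten_mono food_times 0 pv hpv0
          rw [hC0, hCpv] at this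
          omega
      have hCMgt : k < pvEaten food_times Mv := by rw [hCM]; exact hsumgt
      have hloMv : min 0 mv < Mv := by
        by_contra hge
        exact absurd (le_trans (pvEaten_mono food_times Mv (min 0 mv) (by omega)) hClo)
          (not_le.mpr hCMgt)
      obtain ⟨hr1, hr2, hr3, hr4, -⟩ :=
        pvBSearch_spec food_times k (Mv - min 0 mv).toNat (min 0 mv) Mv rfl hloMv hCMgt
      set r := pvBSearch food_times k (min 0 mv) Mv with hrdef
      have hCrle : pvEaten food_times r ≤ k := hr4 hClo
      have hrt : r < t := by
        by_contra hge
        have := pvEaten_mono food_times t r (by omega)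
        rw [hCt] at this
        omega
      have hpvr : pv ≤ r := by
        by_contra hlt2
        have := pvEaten_mono food_times (r + 1) pv (by omega)
        rw [hCpv] at this
        omega
      have hCr : pvEaten food_times r = sp + (r - pv) * lv := by
        rw [hsplitC r hpvr (le_of_lt hrt), hsp_eq]; ring
      -- B's survivor list equals F (same threshold region: no food value in (pv, t))
      have hsurv : (PySem.List.enumerate food_times 0).filterMap
          (fun x => if x.2 > r then some (x.1 + 1) else none) = F := by
        rw [hF]
        rw [pv_filterMap_if (fun x : Int × Int => x.2 > r) (fun x : Int × Int => x.1 + 1)]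
        rw [pv_filterMap_if (fun x : Int × Int => x.2 > pv) (fun x : Int × Int => x.1 + 1)]
        congr 1
        apply List.filter_congr
        intro a ha
        have hmem : a.2 ∈ food_times := by
          have := PySem.List.map_snd_enumerate food_times 0
          rw [← this]
          exact List.mem_map_of_mem ha
        rcases hdichot a.2 hmem with h1 | h1 <;> (rw [decide_eq_decide]; omega)
      rw [hsurv, hCr]
      -- |F| = lv
      have hFlen : ((F.length : Nat) : Int) = lv := by
        rw [hF, pv_filterMap_if (fun x : Int × Int => x.2 > pv) (fun x : Int × Int => x.1 + 1)]
        rw [List.length_map, ← List.countP_eq_length_filter]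
        have h1 : (PySem.List.enumerate food_times 0).countP
              ((fun x : Int => decide (x > pv)) ∘ (fun x : Int × Int => x.2))
            = food_times.countP (fun x => decide (x > pv)) := by
          rw [← List.countP_map, PySem.List.map_snd_enumerate]
        have h2 : food_times.countP (fun x => decide (x > pv))
            = s.countP (fun x => decide (x > pv)) := (hperm.countP_eq _).symm
        have h3 : s.countP (fun x => decide (x > pv)) = rest.length + 1 := by
          rw [hcon, List.countP_append]
          have hz : (con' ++ [p]).countP (fun x => decide (x > pv)) = 0 := by
            rw [List.countP_eq_zero]
            intro a ha
            have := hcon_le a ha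
            simp [not_lt.mpr this]
          have ho : (t :: rest).countP (fun x => decide (x > pv)) = rest.length + 1 := by
            have : (t :: rest).countP (fun x => decide (x > pv)) = (t :: rest).length := by
              rw [List.countP_eq_length]
              intro a ha
              have := hsuf_ge a ha
              simp only [decide_eq_true_eq]
              omega
            rw [this, List.length_cons]
          rw [hz, ho, Nat.zero_add]
        have h4 : (PySem.List.enumerate food_times 0).countP
            (fun x : Int × Int => decide (x.2 > pv)) = rest.length + 1 := by
          rw [show (fun x : Int × Int => decide (x.2 > pv))
            = ((fun x : Int => decide (x > pv)) ∘ (fun x : Int × Int => x.2)) from rfl]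
          rw [h1, h2, h3]
        rw [h4]
        rw [hlv']
        push_cast
        ring
      have hL0 : 0 < ((F.length : Nat) : Int) := by omega
      rw [List.length_reverse, if_pos (show F.length ≠ 0 by omega)]
      rw [PySem.Int.mod_eq_emod_of_pos hL0, PySem.Int.mod_eq_emod_of_pos hL0]
      -- B's index reduces to (k - sp) % |F|
      have hBidx : (k - (sp + (r - pv) * lv)) % ((F.length : Nat) : Int)
          = (k - sp) % ((F.length : Nat) : Int) := by
        rw [show k - (sp + (r - pv) * lv)
            = (k - sp) + ((F.length : Nat) : Int) * (pv - r) from by rw [hFlen]; ring]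
        rw [Int.add_mul_emod_self_left]
      rw [hBidx]
      have hm0 : 0 ≤ (k - sp) % ((F.length : Nat) : Int) := Int.emod_nonneg _ (by omega)
      have hm1 : (k - sp) % ((F.length : Nat) : Int) < ((F.length : Nat) : Int) :=
        Int.emod_lt_of_pos _ hL0
      have hiA : (sp + (t - pv) * lv - k - 1) % ((F.length : Nat) : Int)
          = ((F.length : Nat) : Int) - 1 - (k - sp) % ((F.length : Nat) : Int) := by
        have hdiv : ((F.length : Nat) : Int) * ((k - sp) / ((F.length : Nat) : Int))
            + (k - sp) % ((F.length : Nat) : Int) = k - sp := Int.mul_ediv_add_emod _ _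
        have hsplit : sp + (t - pv) * lv - k - 1
            = (((F.length : Nat) : Int) - 1 - (k - sp) % ((F.length : Nat) : Int))
              + ((F.length : Nat) : Int) * ((t - pv) - (k - sp) / ((F.length : Nat) : Int) - 1) := by
          rw [← hFlen] at hbrk ⊢
          linear_combination hdiv
        rw [hsplit, Int.add_mul_emod_self_left]
        exact Int.emod_eq_of_lt (by omega) (by omega)
      rw [hiA]
      rw [PySem.List.pyGetD_eq_getElem _ 0 (by omega) (by rw [List.length_reverse]; omega)]
      rw [PySem.List.pyGetD_eq_getElem _ 0 hm0 (by omega)]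
      rw [List.getElem_reverse]
      congr 1
      omega
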